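-- pv_equiv track=rewrite | github.com/MrBrantCode/unitest_baseline | mut_generate/mist_train_taco/taco_9116/solution.py | max_snowmen
-- ===== SOURCE A (Python) =====
-- from heapq import heappop, heappush, heapify
-- from collections import defaultdict
--
-- def max_snowmen(n, radii):
--     H = defaultdict(int)
--     for r in radii:
--         H[r] += 1
--
--     D = [(-1 * v, k) for (k, v) in H.items()]
--     heapify(D)
--
--     ret = []
--     while len(D) > 2:
--         (a, b, c) = (heappop(D), heappop(D), heappop(D))
--         ret.append(sorted([a[1], b[1], c[1]], reverse=True))
--         for (x, xi) in ((i + 1, j) for (i, j) in (a, b, c)):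
--             if x:
--                 heappush(D, (x, xi))
--
--     return len(ret), ret
-- ===== SOURCE B (Python) =====
-- def max_snowmen(n, radii):
--     counts = {}
--     for r in radii:
--         counts[r] = counts.get(r, 0) + 1
--     ret = []
--     while len(counts) >= 3:
--         trio = sorted(counts, key=lambda r: (-counts[r], r))[:3]
--         ret.append(sorted(trio, reverse=True))
--         for r in trio:
--             if counts[r] == 1:
--                 del counts[r]
--             else:
--                 counts[r] -= 1
--     return len(ret), ret
-- ===== Notes on version B (the rewrite author's own statement) =====
-- stated objective: simpler
-- what changed: Replaces the heap of (-count, radius) tuples with a plain radius->count dict: each round picks the three most frequent radii (smallest radius on ties) by sorting the current keys, then decrements their counts, dropping zeros.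
import Mathlib
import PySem

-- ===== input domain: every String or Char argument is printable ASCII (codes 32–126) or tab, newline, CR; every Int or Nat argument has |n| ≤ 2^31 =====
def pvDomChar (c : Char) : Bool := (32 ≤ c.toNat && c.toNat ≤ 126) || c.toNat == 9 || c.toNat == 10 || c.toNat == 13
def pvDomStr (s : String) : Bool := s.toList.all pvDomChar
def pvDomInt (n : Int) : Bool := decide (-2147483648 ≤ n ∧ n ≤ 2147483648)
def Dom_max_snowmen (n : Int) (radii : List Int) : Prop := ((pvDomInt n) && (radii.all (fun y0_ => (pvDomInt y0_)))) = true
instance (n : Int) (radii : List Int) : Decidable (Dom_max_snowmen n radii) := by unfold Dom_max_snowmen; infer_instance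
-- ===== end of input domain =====

-- B replaces A's heap with a plain count dict and a per-round sorted selection of the three
-- most frequent radii (smallest on count ties) — a different data structure, no heap; same greedy result.


-- ===== PORT A =====
-- Python tuple '<' on (int, int)
def pairLt (p q : Int × Int) : Bool := p.1 < q.1 || (p.1 == q.1 && p.2 < q.2)

-- heapq.heappop: removes and returns the smallest element; the heap is represented by its
-- contents as a list (heapify keeps the contents, heappush appends). This is exact for A:
-- heappop's contract is to return the minimum, and tuples tying in the order are identical.
def heapPop (l : List (Int × Int)) : Option ((Int × Int) × List (Int × Int)) :=
  match l with
  | [] => none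
  | x :: xs =>
    let m := xs.foldl (fun a b => if pairLt b a then b else a) x
    some (m, l.erase m)

-- the 'while len(D) > 2' loop; fuel = radii.length + 1 always suffices (each round consumes
-- three balls), and the 'none' branches are unreachable under the length guard
def aLoop : Nat → List (Int × Int) → List (List Int) → List (List Int)
  | 0, _, ret => ret
  | fuel+1, D, ret =>
    if 2 < D.length then
      match heapPop D with
      | none => ret
      | some (a, D1) =>
        match heapPop D1 with
        | none => ret
        | some (b, D2) =>
          match heapPop D2 with
          | none => ret
          | some (c, D3) =>
            let trio := PySem.List.sorted [a.2, b.2, c.2] (fun x => x) true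
            let D4 := [a, b, c].foldl
              (fun acc p => if p.1 + 1 ≠ 0 then acc ++ [(p.1 + 1, p.2)] else acc) D3
            aLoop fuel D4 (ret ++ [trio])
    else ret

def max_snowmen (n : Int) (radii : List Int) : Int × List (List Int) :=
  let H := radii.foldl (fun d r => d.modify r 0 (· + 1)) PySem.Dict.empty
  let D := H.items.map (fun p => (-1 * p.2, p.1))
  let ret := aLoop (radii.length + 1) D []
  ((ret.length : Int), ret)

-- ===== PORT B =====
-- the 'while len(counts) >= 3' loop of Source B; same fuel convention as aLoop
def bLoop : Nat → PySem.Dict Int Int → List (List Int) → List (List Int)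
  | 0, _, ret => ret
  | fuel+1, d, ret =>
    if 3 ≤ d.size then
      let trio := (PySem.List.sorted2 d.keys (fun r => -(d.getD r 0)) (fun r => r) false).take 3
      let ret' := ret ++ [PySem.List.sorted trio (fun x => x) true]
      let d' := trio.foldl
        (fun acc r => if acc.getD r 0 == 1 then acc.erase r else acc.insert r (acc.getD r 0 - 1)) d
      bLoop fuel d' ret'
    else ret

def max_snowmen_alt (n : Int) (radii : List Int) : Int × List (List Int) :=
  let counts := radii.foldl (fun d r => d.insert r (d.getD r 0 + 1)) PySem.Dict.empty
  let ret := bLoop (radii.length + 1) counts []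
  ((ret.length : Int), ret)

-- ===== PRECONDITION & SPEC =====
def Spec_max_snowmen (n : Int) (radii : List Int) (out : Int × List (List Int)) : Prop := out = max_snowmen_alt n radii
instance (n : Int) (radii : List Int) (out : Int × List (List Int)) : Decidable (Spec_max_snowmen n radii out) := by unfold Spec_max_snowmen; infer_instance

-- ===== CLAIM (what is proved, stated in full; the proofs are below) =====
def Claim_equal_max_snowmen : Prop := ∀ (n : Int) (radii : List Int), Dom_max_snowmen n radii → Spec_max_snowmen n radii (max_snowmen n radii)

-- ===== LEMMAS AND PROOFS =====

-- the strict lexicographic order behind pairLt, as a Prop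
def lexLtP (p q : Int × Int) : Prop := p.1 < q.1 ∨ (p.1 = q.1 ∧ p.2 < q.2)

-- the multiset view of a count entry: (radius, count) ↦ (-count, radius)
def pvG (p : Int × Int) : Int × Int := (-p.2, p.1)

lemma pairLt_iff (p q : Int × Int) : pairLt p q = true ↔ lexLtP p q := by
  simp [pairLt, lexLtP]

lemma foldlMin_mem_min (x : Int × Int) (xs : List (Int × Int)) :
    xs.foldl (fun a b => if pairLt b a then b else a) x ∈ x :: xs ∧
    ∀ y ∈ x :: xs, ¬ lexLtP y (xs.foldl (fun a b => if pairLt b a then b else a) x) := by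
  induction xs generalizing x with
  | nil =>
    refine ⟨by simp, ?_⟩
    intro y hy
    simp only [List.foldl_nil]
    simp only [List.mem_cons, List.not_mem_nil, or_false] at hy
    subst hy; unfold lexLtP; omega
  | cons b xs ih =>
    simp only [List.foldl_cons]
    by_cases hbx : pairLt b x = true
    · rw [if_pos hbx]
      obtain ⟨hmem, hmin⟩ := ih b
      have h2 : lexLtP b x := (pairLt_iff _ _).mp hbx
      refine ⟨?_, ?_⟩
      · rcases List.mem_cons.mp hmem with h | h
        · rw [h]; simp
        · simp [h]
      · intro y hy hlt
        simp only [List.mem_cons] at hy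
        rcases hy with h1 | h1 | h1
        · have hwin := hmin b (by simp)
          rw [h1] at hlt
          unfold lexLtP at *; omega
        · exact hmin b (by simp) (h1 ▸ hlt)
        · exact hmin y (by simp [h1]) hlt
    · rw [if_neg hbx]
      obtain ⟨hmem, hmin⟩ := ih x
      have h2 : ¬ lexLtP b x := fun hh => hbx ((pairLt_iff _ _).mpr hh)
      refine ⟨?_, ?_⟩
      · rcases List.mem_cons.mp hmem with h | h
        · rw [h]; simp
        · simp [h]
      · intro y hy hlt
        simp only [List.mem_cons] at hy
        rcases hy with h1 | h1 | h1
        · exact hmin x (by simp) (h1 ▸ hlt)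
        · have hwin := hmin x (by simp)
          rw [h1] at hlt
          unfold lexLtP at *; omega
        · exact hmin y (by simp [h1]) hlt

-- popping a heap permuted from a strictly sorted list yields that list's head
lemma heapPop_spec (D : List (Int × Int)) (x : Int × Int) (t : List (Int × Int))
    (hperm : (x :: t).Perm D) (hp : (x :: t).Pairwise lexLtP) :
    heapPop D = some (x, D.erase x) ∧ t.Perm (D.erase x) := by
  have hD : D ≠ [] := by
    intro h; subst h; exact absurd hperm.length_eq (by simp)
  obtain ⟨d0, dt, rfl⟩ := List.exists_cons_of_ne_nil hD
  obtain ⟨hmem, hmin⟩ := foldlMin_mem_min d0 dt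
  set m := dt.foldl (fun a b => if pairLt b a then b else a) d0 with hm
  have hmx : m = x := by
    have hmL : m ∈ x :: t := hperm.symm.subset hmem
    rcases List.mem_cons.mp hmL with h | h
    · exact h
    · exfalso
      have hxlt : lexLtP x m := (List.pairwise_cons.mp hp).1 m h
      exact hmin x (hperm.subset (by simp)) hxlt
  constructor
  · show some (m, (d0 :: dt).erase m) = some (x, (d0 :: dt).erase x)
    rw [hmx]
  · have := hperm.erase x
    rwa [List.erase_cons_head] at this

-- Python's tuple key (k1 x, k2 x) is the lexicographic single key
lemma sorted2_eq_sorted_toLex {α : Type} (xs : List α) (k1 k2 : α → Int) :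
    PySem.List.sorted2 xs k1 k2 false
      = PySem.List.sorted xs (fun a => toLex (k1 a, k2 a)) false := by
  show List.foldl (fun acc x => PySem.List.insertBy _ x acc) [] xs
      = List.foldl (fun acc x => PySem.List.insertBy _ x acc) [] xs
  have hbe : (fun a b => decide (k1 a < k1 b) || (!decide (k1 b < k1 a) && decide (k2 a < k2 b)))
      = (fun a b => decide ((toLex (k1 a, k2 a) : Lex (Int × Int)) < toLex (k1 b, k2 b))) := by
    funext a b
    have := @Prod.Lex.lt_iff Int Int _ _ (toLex (k1 a, k2 a)) (toLex (k1 b, k2 b))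
    have hiff : ((toLex (k1 a, k2 a) : Lex (Int × Int)) < toLex (k1 b, k2 b))
        ↔ (k1 a < k1 b ∨ (k1 a = k1 b ∧ k2 a < k2 b)) := by
      simpa using this
    rw [Bool.eq_iff_iff]
    simp only [Bool.or_eq_true, Bool.and_eq_true, Bool.not_eq_true', decide_eq_true_eq,
      decide_eq_false_iff_not, hiff]
    omega
  rw [hbe]

lemma items_split (d : PySem.Dict Int Int) (hn : d.keys.Nodup) (r c : Int)
    (hm : (r, c) ∈ d.items) :
    ∃ pre suf, d.items = pre ++ (r, c) :: suf ∧ (∀ p ∈ pre, p.1 ≠ r) ∧ (∀ p ∈ suf, p.1 ≠ r) := by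
  obtain ⟨pre, suf, h⟩ := List.append_of_mem hm
  have hk : d.keys = pre.map Prod.fst ++ r :: suf.map Prod.fst := by
    show d.items.map Prod.fst = _
    simp [h]
  rw [hk] at hn
  have hsplit := List.nodup_append.mp hn
  refine ⟨pre, suf, h, ?_, ?_⟩
  · intro p hp hpr
    have h2 : p.1 ∈ pre.map Prod.fst := List.mem_map_of_mem hp
    exact hsplit.2.2 p.1 h2 r (by simp) hpr
  · intro p hp hpr
    have h2 : p.1 ∈ suf.map Prod.fst := List.mem_map_of_mem hp
    have h3 := (List.pairwise_cons.mp hsplit.2.1).1 p.1 h2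
    exact h3 hpr.symm

-- one step of Source B's decrement/delete, at the items level
lemma stepB (d : PySem.Dict Int Int) (hn : d.keys.Nodup) (r c : Int) (hm : (r, c) ∈ d.items) :
    (if d.getD r 0 == 1 then d.erase r else d.insert r (d.getD r 0 - 1)).keys.Nodup ∧
    ((if d.getD r 0 == 1 then d.erase r else d.insert r (d.getD r 0 - 1)).items.map pvG).Perm
      ((d.items.map pvG).erase (pvG (r, c)) ++ (if c = 1 then [] else [(-(c-1), r)])) ∧
    (∀ r' c', r' ≠ r → ((r', c') ∈ d.items ↔
      (r', c') ∈ (if d.getD r 0 == 1 then d.erase r else d.insert r (d.getD r 0 - 1)).items)) := by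
  have hgd : d.getD r 0 = c := PySem.Dict.getD_of_mem_items d hm hn 0
  obtain ⟨pre, suf, hsplit, hpre, hsuf⟩ := items_split d hn r c hm
  have hpreG : pvG (r, c) ∉ pre.map pvG := by
    intro h
    obtain ⟨p, hp, hpg⟩ := List.mem_map.mp h
    exact hpre p hp (congrArg Prod.snd hpg)
  have herase : ((d.items.map pvG).erase (pvG (r, c))) = pre.map pvG ++ suf.map pvG := by
    rw [hsplit]
    simp only [List.map_append, List.map_cons]
    rw [List.erase_append_right _ hpreG, List.erase_cons_head]
  by_cases hc : c = 1
  · subst hc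
    rw [hgd]
    simp only [if_pos (by decide : ((1 : Int) == 1) = true)]
    have hpreF : pre.filter (fun p => !(p.1 == r)) = pre :=
      List.filter_eq_self.mpr (fun p hp => by simpa using hpre p hp)
    have hsufF : suf.filter (fun p => !(p.1 == r)) = suf :=
      List.filter_eq_self.mpr (fun p hp => by simpa using hsuf p hp)
    have hitems : (d.erase r).items = pre ++ suf := by
      show d.items.filter _ = _
      rw [hsplit, List.filter_append, List.filter_cons_of_neg (by simp), hpreF, hsufF]
    have hsub : List.Sublist ((pre ++ suf).map Prod.fst) (d.items.map Prod.fst) := by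
      rw [hsplit]
      exact ((List.sublist_cons_self (r, 1) suf).append_left pre).map _
    refine ⟨?_, ?_, ?_⟩
    · show ((d.erase r).items.map Prod.fst).Nodup
      rw [hitems]
      exact List.Nodup.sublist hsub hn
    · rw [hitems, herase]
      simp [List.map_append]
    · intro r' c' hne
      rw [hitems, hsplit]
      simp only [List.mem_append, List.mem_cons]
      constructor
      · rintro (h | h | h)
        · exact Or.inl h
        · exact absurd (congrArg Prod.fst h) (by simpa using hne)
        · exact Or.inr h
      · rintro (h | h)
        · exact Or.inl h
        · exact Or.inr (Or.inr h)
  · rw [hgd]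
    have hcb : (c == 1) = false := by simpa using hc
    simp only [hcb, Bool.false_eq_true, if_false, if_neg hc]
    have hcont : d.contains r = true := by
      rw [PySem.Dict.contains_iff_mem_keys]
      show r ∈ d.items.map Prod.fst
      exact List.mem_map_of_mem hm
    have hpreM : pre.map (fun p => if p.1 == r then (r, c - 1) else p) = pre := by
      rw [List.map_congr_left (g := id) (fun p hp => by
        simp [show (p.1 == r) = false by simpa using hpre p hp]), List.map_id]
    have hsufM : suf.map (fun p => if p.1 == r then (r, c - 1) else p) = suf := by
      rw [List.map_congr_left (g := id) (fun p hp => by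
        simp [show (p.1 == r) = false by simpa using hsuf p hp]), List.map_id]
    have hitems : (d.insert r (c - 1)).items = pre ++ (r, c - 1) :: suf := by
      rw [PySem.Dict.items_insert_of_contains d (c - 1) hcont, hsplit]
      simp only [List.map_append, List.map_cons, hpreM, hsufM]
      simp
    refine ⟨?_, ?_, ?_⟩
    · show ((d.insert r (c - 1)).items.map Prod.fst).Nodup
      rw [hitems]
      have heq : (pre ++ (r, c - 1) :: suf).map Prod.fst
          = (pre ++ (r, c) :: suf).map Prod.fst := by simp
      rw [heq, ← hsplit]
      exact hn
    · rw [hitems, herase]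
      simp only [List.map_append, List.map_cons]
      refine List.Perm.trans List.perm_middle ?_
      exact (List.perm_append_singleton _ _).symm
    · intro r' c' hne
      rw [hitems, hsplit]
      simp only [List.mem_append, List.mem_cons]
      constructor
      · rintro (h | h | h)
        · exact Or.inl h
        · exact absurd (congrArg Prod.fst h) (by simpa using hne)
        · exact Or.inr (Or.inr h)
      · rintro (h | h | h)
        · exact Or.inl h
        · exact absurd (congrArg Prod.fst h) (by simpa using hne)
        · exact Or.inr (Or.inr h)

-- the two loops agree whenever the heap contents are a permutation of the dict's
-- (-count, radius) entries and the dict's keys are distinct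
lemma loop_eq (fuel : Nat) (D : List (Int × Int)) (d : PySem.Dict Int Int)
    (ret : List (List Int)) (hn : d.keys.Nodup) (hperm : D.Perm (d.items.map pvG)) :
    aLoop fuel D ret = bLoop fuel d ret := by
  induction fuel generalizing D d ret with
  | zero => rfl
  | succ fuel ih =>
    have hlen : D.length = d.size := by
      rw [hperm.length_eq, List.length_map]
      rfl
    by_cases hg : 3 ≤ d.size
    case neg =>
      rw [aLoop, bLoop, if_neg hg, if_neg (by omega)]
    case pos =>
      -- the canonical selection order: keys sorted by (-count, key)
      set f : Int → Int × Int := fun r => (-(d.getD r 0), r) with hf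
      have hitems : d.items = d.keys.map (fun k => (k, d.getD k 0)) :=
        PySem.Dict.items_eq_map_keys d hn 0
      have hmapf : d.items.map pvG = d.keys.map f := by
        rw [hitems, List.map_map]; rfl
      set S := PySem.List.sorted d.keys (fun a => toLex (-(d.getD a 0), a)) false with hS
      have hSperm : S.Perm d.keys := PySem.List.sorted_perm _ _ _
      have hSnodup : S.Nodup := hSperm.nodup_iff.mpr hn
      have hSpair : S.Pairwise (fun a b => lexLtP (f a) (f b)) := by
        have h1 := PySem.List.sorted_pairwise d.keys (fun a => (toLex (-(d.getD a 0), a) : Lex (Int × Int)))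
        refine ((h1.and hSnodup).imp ?_)
        intro a b ⟨hle, hne⟩
        rw [Prod.Lex.le_iff] at hle
        simp only [lexLtP, hf]
        simp only [ofLex_toLex] at hle
        rcases hle with h | ⟨h1, h2⟩
        · exact Or.inl h
        · exact Or.inr ⟨h1, lt_of_le_of_ne h2 hne⟩
      have hSlen : 3 ≤ S.length := by
        rw [hSperm.length_eq]
        simpa [PySem.Dict.size, PySem.Dict.keys] using hg
      -- destructure the first three elements of S
      obtain ⟨s0, s1, s2, srest, hSlist⟩ : ∃ s0 s1 s2 srest, S = s0 :: s1 :: s2 :: srest := by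
        match S, hSlen with
        | a :: b :: c :: t, _ => exact ⟨a, b, c, t, rfl⟩
      -- the three successive heap minima are f s0, f s1, f s2
      have hLperm : (f s0 :: f s1 :: f s2 :: srest.map f).Perm D := by
        have h1 : (S.map f).Perm D := (hSperm.map f).trans (hmapf ▸ hperm.symm)
        rw [hSlist] at h1
        simpa using h1
      have hLpair : (f s0 :: f s1 :: f s2 :: srest.map f).Pairwise lexLtP := by
        have h1 : (S.map f).Pairwise lexLtP := List.pairwise_map.mpr hSpair
        rw [hSlist] at h1
        simpa using h1
      obtain ⟨hpop0, hperm1⟩ := heapPop_spec D (f s0) _ hLperm hLpair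
      have hLpair1 := (List.pairwise_cons.mp hLpair).2
      have hLpair2 := (List.pairwise_cons.mp hLpair1).2
      obtain ⟨hpop1, hperm2⟩ := heapPop_spec (D.erase (f s0)) (f s1) _ hperm1 hLpair1
      obtain ⟨hpop2, hperm3⟩ :=
        heapPop_spec ((D.erase (f s0)).erase (f s1)) (f s2) _ hperm2 hLpair2
      -- memberships and distinctness
      have hd01 : s0 ≠ s1 := by
        have := hSnodup; rw [hSlist] at this; simp at this; tauto
      have hd02 : s0 ≠ s2 := by
        have := hSnodup; rw [hSlist] at this; simp at this; tauto
      have hd12 : s1 ≠ s2 := by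
        have := hSnodup; rw [hSlist] at this; simp at this; tauto
      have hmem0 : (s0, d.getD s0 0) ∈ d.items := by
        rw [hitems]
        exact List.mem_map_of_mem (hSperm.subset (by rw [hSlist]; simp))
      have hmem1 : (s1, d.getD s1 0) ∈ d.items := by
        rw [hitems]
        exact List.mem_map_of_mem (hSperm.subset (by rw [hSlist]; simp))
      have hmem2 : (s2, d.getD s2 0) ∈ d.items := by
        rw [hitems]
        exact List.mem_map_of_mem (hSperm.subset (by rw [hSlist]; simp))
      -- three applications of stepB
      obtain ⟨hn1, hp1, ht1⟩ := stepB d hn s0 (d.getD s0 0) hmem0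
      set d1 := if d.getD s0 0 == 1 then d.erase s0 else d.insert s0 (d.getD s0 0 - 1) with hd1
      obtain ⟨hn2, hp2, ht2⟩ :=
        stepB d1 hn1 s1 (d.getD s1 0) ((ht1 s1 (d.getD s1 0) hd01.symm).mp hmem1)
      set d2 := if d1.getD s1 0 == 1 then d1.erase s1 else d1.insert s1 (d1.getD s1 0 - 1) with hd2
      obtain ⟨hn3, hp3, ht3⟩ :=
        stepB d2 hn2 s2 (d.getD s2 0)
          ((ht2 s2 (d.getD s2 0) hd12.symm).mp ((ht1 s2 (d.getD s2 0) hd02.symm).mp hmem2))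
      set d3 := if d2.getD s2 0 == 1 then d2.erase s2 else d2.insert s2 (d2.getD s2 0 - 1) with hd3
      -- abbreviations
      set M := d.items.map pvG with hM
      set P0 := (if d.getD s0 0 = 1 then ([] : List (Int × Int)) else [(-(d.getD s0 0 - 1), s0)]) with hP0
      set P1 := (if d.getD s1 0 = 1 then ([] : List (Int × Int)) else [(-(d.getD s1 0 - 1), s1)]) with hP1
      set P2 := (if d.getD s2 0 = 1 then ([] : List (Int × Int)) else [(-(d.getD s2 0 - 1), s2)]) with hP2
      have hp1 : (d1.items.map pvG).Perm (M.erase (f s0) ++ P0) := hp1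
      have hp2 : (d2.items.map pvG).Perm ((d1.items.map pvG).erase (f s1) ++ P1) := hp2
      have hp3 : (d3.items.map pvG).Perm ((d2.items.map pvG).erase (f s2) ++ P2) := hp3
      have hML : M.Perm (f s0 :: f s1 :: f s2 :: srest.map f) := (hLperm.trans hperm).symm
      have e0 : (M.erase (f s0)).Perm (f s1 :: f s2 :: srest.map f) := by
        have := hML.erase (f s0)
        rwa [List.erase_cons_head] at this
      have e1 : ((M.erase (f s0)).erase (f s1)).Perm (f s2 :: srest.map f) := by
        have := e0.erase (f s1)
        rwa [List.erase_cons_head] at this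
      have hl1mem : f s1 ∈ M.erase (f s0) := e0.symm.subset (by simp)
      have hl2mem : f s2 ∈ (M.erase (f s0)).erase (f s1) := e1.symm.subset (by simp)
      -- accumulate the B-side permutation
      have hp2' : (d2.items.map pvG).Perm
          (((M.erase (f s0)).erase (f s1) ++ P0) ++ P1) := by
        refine hp2.trans (List.Perm.append_right P1 ?_)
        have := hp1.erase (f s1)
        rw [List.erase_append_left _ hl1mem] at this
        exact this
      have hp3' : (d3.items.map pvG).Perm
          (((((M.erase (f s0)).erase (f s1)).erase (f s2) ++ P0) ++ P1) ++ P2) := by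
        refine hp3.trans (List.Perm.append_right P2 ?_)
        have := hp2'.erase (f s2)
        rw [List.erase_append_left _ (by exact List.mem_append_left _ hl2mem),
            List.erase_append_left _ hl2mem] at this
        exact this
      -- unfold one round of both loops
      rw [aLoop, bLoop, if_pos hg, if_pos (show 2 < D.length by omega)]
      simp only [hpop0, hpop1, hpop2]
      rw [sorted2_eq_sorted_toLex d.keys (fun r => -(d.getD r 0)) (fun r => r)]
      rw [← hS, hSlist]
      have hQ : ∀ (acc : List (Int × Int)) (s c : Int),
          (if -c + 1 ≠ 0 then acc ++ [(-c + 1, s)] else acc)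
            = acc ++ (if c = 1 then [] else [(-(c - 1), s)]) := by
        intro acc s c
        by_cases h : c = 1
        · subst h; simp
        · rw [if_pos (by omega), if_neg h]
          have : -c + 1 = -(c - 1) := by ring
          rw [this]
      simp only [List.foldl_cons, List.foldl_nil, List.take_succ_cons, List.take_zero, hf]
      rw [hQ, hQ, hQ]
      exact ih _ d3 _ hn3
        (((((hperm.erase (f s0)).erase (f s1)).erase (f s2)).append_right
            P0 |>.append_right P1 |>.append_right P2).trans hp3'.symm)


-- ===== VERDICT (by name: the statement is the Claim_ definition above) =====
theorem max_snowmen_spec : Claim_equal_max_snowmen := by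
  intro n radii _
  show max_snowmen n radii = max_snowmen_alt n radii
  unfold max_snowmen max_snowmen_alt
  simp only
  have hA : radii.foldl (fun (d : PySem.Dict Int Int) r => d.modify r 0 (· + 1)) PySem.Dict.empty
      = PySem.Dict.counter radii := (PySem.Dict.counter_eq_foldl radii).symm
  have hB : radii.foldl (fun (d : PySem.Dict Int Int) r => d.insert r (d.getD r 0 + 1)) PySem.Dict.empty
      = PySem.Dict.counter radii := PySem.Dict.foldl_insert_getD_add_one_eq_counter radii
  rw [hA, hB]
  have hmap : (PySem.Dict.counter radii).items.map (fun p : Int × Int => (-1 * p.2, p.1))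
      = (PySem.Dict.counter radii).items.map pvG := by
    apply List.map_congr_left
    intro p _
    simp [pvG]
  rw [hmap, loop_eq (radii.length + 1) _ (PySem.Dict.counter radii) []
    (PySem.Dict.nodup_keys_counter radii) (List.Perm.refl _)]
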